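-- pv_equiv track=rewrite | github.com/MrBrantCode/unitest_baseline | mut_generate/mist_train_taco/taco_17259/solution.py | count_return_to_origin_substrings
-- ===== SOURCE A (Python) =====
-- def count_return_to_origin_substrings(n: int, commands: str) -> int:
--     ans = 0
--     for i in range(n):
--         x, y = 0, 0
--         for j in range(i, n):
--             if commands[j] == 'L':
--                 x -= 1
--             elif commands[j] == 'R':
--                 x += 1
--             elif commands[j] == 'U':
--                 y += 1
--             else:
--                 y -= 1
--             if x == 0 and y == 0:
--                 ans += 1
--     return ans
-- ===== SOURCE B (Python) =====
-- def count_return_to_origin_substrings(n: int, commands: str) -> int: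
--     # One pass: a substring commands[i:j+1] returns to the origin iff the prefix
--     # positions after i and after j+1 moves are equal, so count equal-prefix pairs
--     # with a hash map of positions seen so far.
--     x = y = 0
--     seen = {(0, 0): 1}
--     ans = 0
--     for j in range(n):
--         c = commands[j]
--         if c == 'L':
--             x -= 1
--         elif c == 'R':
--             x += 1
--         elif c == 'U':
--             y += 1
--         else:
--             y -= 1
--         ans += seen.get((x, y), 0)
--         seen[(x, y)] = seen.get((x, y), 0) + 1
--     return ans
-- ===== Notes on version B (the rewrite author's own statement) =====
-- stated objective: faster
-- what changed: Replaces the O(n^2) nested loops (re-walking every suffix) by a single pass that tracks the prefix position and counts equal prefix-position pairs with a hash map.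
import Mathlib
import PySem

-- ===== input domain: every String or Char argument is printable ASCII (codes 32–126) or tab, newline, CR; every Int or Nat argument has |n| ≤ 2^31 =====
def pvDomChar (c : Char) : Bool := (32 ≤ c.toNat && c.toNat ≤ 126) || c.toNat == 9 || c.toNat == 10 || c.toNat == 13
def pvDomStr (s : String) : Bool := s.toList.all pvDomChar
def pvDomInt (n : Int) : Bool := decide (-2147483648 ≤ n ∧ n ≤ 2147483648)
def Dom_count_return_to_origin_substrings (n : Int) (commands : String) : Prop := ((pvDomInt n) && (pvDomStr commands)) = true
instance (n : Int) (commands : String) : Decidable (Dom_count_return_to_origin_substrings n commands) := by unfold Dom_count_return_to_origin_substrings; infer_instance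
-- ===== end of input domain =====

-- B replaces A's O(n^2) nested suffix walks by a single pass counting equal prefix-position
-- pairs with a hash map; proved to return the same value whenever A returns (n ≤ len(commands)).


-- shared helper: the if/elif chain updating (x, y) from one command character (identical in A and B)
def pvMove (p : Int × Int) (c : Char) : Int × Int :=
  if c = 'L' then (p.1 - 1, p.2)
  else if c = 'R' then (p.1 + 1, p.2)
  else if c = 'U' then (p.1, p.2 + 1)
  else (p.1, p.2 - 1)

-- ===== PORT A =====
-- commands[j] : index is in range for every visited j under Pre_, so pyGetD's default is never read
def count_return_to_origin_substrings (n : Int) (commands : String) : Int :=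
  (PySem.List.pyRange 0 n 1).foldl
    (fun ans i =>
      ((PySem.List.pyRange i n 1).foldl
        (fun (st : (Int × Int) × Int) j =>
          let p := pvMove st.1 (PySem.List.pyGetD commands.toList j 'D')
          (p, if p.1 = 0 ∧ p.2 = 0 then st.2 + 1 else st.2))
        ((0, 0), ans)).2)
    0

-- ===== PORT B =====
-- state = (seen : dict position → count, current position, ans); commands[j] in range under Pre_
def count_return_to_origin_substrings_alt (n : Int) (commands : String) : Int :=
  ((PySem.List.pyRange 0 n 1).foldl
    (fun (st : PySem.Dict (Int × Int) Int × (Int × Int) × Int) j =>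
      let p := pvMove st.2.1 (PySem.List.pyGetD commands.toList j 'D')
      (st.1.insert p (st.1.getD p 0 + 1), p, st.2.2 + st.1.getD p 0))
    (PySem.Dict.empty.insert ((0, 0) : Int × Int) (1 : Int), ((0, 0) : Int × Int), (0 : Int))).2.2

-- ===== PRECONDITION & SPEC =====
-- A raises IndexError iff it reads commands[j] for some j ≥ len(commands), i.e. iff len < n
def Pre_count_return_to_origin_substrings (n : Int) (commands : String) : Prop :=
  n ≤ (commands.toList.length : Int)
instance (n : Int) (commands : String) : Decidable (Pre_count_return_to_origin_substrings n commands) := by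
  unfold Pre_count_return_to_origin_substrings; infer_instance

def pvWitness_count_return_to_origin_substrings : Int × String := (4, "UDLR")

def Spec_count_return_to_origin_substrings (n : Int) (commands : String) (out : Int) : Prop := out = count_return_to_origin_substrings_alt n commands
instance (n : Int) (commands : String) (out : Int) : Decidable (Spec_count_return_to_origin_substrings n commands out) := by unfold Spec_count_return_to_origin_substrings; infer_instance

-- ===== CLAIM (what is proved, stated in full; the proofs are below) =====
def Claim_equal_count_return_to_origin_substrings : Prop := ∀ (n : Int) (commands : String), Dom_count_return_to_origin_substrings n commands → Pre_count_return_to_origin_substrings n commands → Spec_count_return_to_origin_substrings n commands (count_return_to_origin_substrings n commands)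

-- ===== LEMMAS AND PROOFS =====

-- positions after each of the moves in l, starting from p (without the start itself)
def pvScan (p : Int × Int) : List Char → List (Int × Int)
  | [] => []
  | c :: l => pvMove p c :: pvScan (pvMove p c) l

-- number of occurrences of q in l (as an Int)
def pvCnt (q : Int × Int) : List (Int × Int) → Int
  | [] => 0
  | p :: l => (if p = q then 1 else 0) + pvCnt q l

-- number of pairs a < b with l[a] = l[b]
def pvPairs : List (Int × Int) → Int
  | [] => 0
  | p :: l => pvCnt p l + pvPairs l

-- number of equal pairs (earlier, later) added by appending T after S, the later one in T
def pvNewPairs (S : List (Int × Int)) : List (Int × Int) → Int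
  | [] => 0
  | q :: T => pvCnt q S + pvNewPairs (S ++ [q]) T

-- A's inner loop body, list level
lemma pv_move_shift (p t : Int × Int) (c : Char) :
    pvMove (p.1 + t.1, p.2 + t.2) c = ((pvMove p c).1 + t.1, (pvMove p c).2 + t.2) := by
  unfold pvMove; split_ifs <;> simp <;> ring

lemma pv_scan_shift (l : List Char) (p t : Int × Int) :
    pvScan (p.1 + t.1, p.2 + t.2) l = (pvScan p l).map (fun a => (a.1 + t.1, a.2 + t.2)) := by
  induction l generalizing p with
  | nil => rfl
  | cons c l ih => simp [pvScan, pv_move_shift, ← ih]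

lemma pv_cnt_shift (l : List (Int × Int)) (q t : Int × Int) :
    pvCnt (q.1 + t.1, q.2 + t.2) (l.map (fun a => (a.1 + t.1, a.2 + t.2))) = pvCnt q l := by
  induction l with
  | nil => rfl
  | cons p l ih =>
    simp only [List.map_cons, pvCnt, ih]
    congr 1
    by_cases h : p = q
    · simp [h]
    · have : ¬ (p.1 + t.1, p.2 + t.2) = (q.1 + t.1, q.2 + t.2) := by
        intro hc
        apply h
        have h1 := congrArg Prod.fst hc
        have h2 := congrArg Prod.snd hc
        simp at h1 h2
        exact Prod.ext h1 h2
      simp [h, this]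

lemma pv_cnt_scan_zero (l : List Char) (p : Int × Int) :
    pvCnt p (pvScan p l) = pvCnt (0, 0) (pvScan (0, 0) l) := by
  have h := pv_cnt_shift (pvScan ((0 : Int), (0 : Int)) l) (0, 0) p
  have hs := pv_scan_shift l (0, 0) p
  simp only [zero_add] at h hs
  rw [show p = (p.1, p.2) from rfl, hs]
  simpa using h

lemma pv_cnt_append_singleton (S : List (Int × Int)) (q r : Int × Int) :
    pvCnt q (S ++ [r]) = pvCnt q S + (if r = q then 1 else 0) := by
  induction S with
  | nil => simp [pvCnt]
  | cons p S ih =>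
    simp only [List.cons_append, pvCnt, ih]
    ring

lemma pv_pairs_append_singleton (S : List (Int × Int)) (q : Int × Int) :
    pvPairs (S ++ [q]) = pvPairs S + pvCnt q S := by
  induction S with
  | nil => simp [pvPairs, pvCnt]
  | cons p S ih =>
    simp only [List.cons_append, pvPairs, ih, pv_cnt_append_singleton, pvCnt]
    have : (if q = p then (1 : Int) else 0) = (if p = q then 1 else 0) := by
      by_cases h : p = q
      · simp [h]
      · rw [if_neg (fun hc => h hc.symm), if_neg h]
    rw [this]; ring

lemma pv_pairs_append (T S : List (Int × Int)) :
    pvPairs (S ++ T) = pvPairs S + pvNewPairs S T := by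
  induction T generalizing S with
  | nil => simp [pvNewPairs]
  | cons q T ih =>
    have : S ++ q :: T = (S ++ [q]) ++ T := by simp
    rw [this, ih, pv_pairs_append_singleton, pvNewPairs]
    ring

-- ---- A side ----

-- A's accumulated answer as a structural recursion over the command list
def pvA : List Char → Int
  | [] => 0
  | c :: l => pvCnt (0, 0) (pvScan (0, 0) (c :: l)) + pvA l

lemma pv_inner_fold (l : List Char) (p : Int × Int) (a : Int) :
    (l.foldl (fun (st : (Int × Int) × Int) c =>
        let q := pvMove st.1 c
        (q, if q.1 = 0 ∧ q.2 = 0 then st.2 + 1 else st.2))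
      (p, a)).2
    = a + pvCnt (0, 0) (pvScan p l) := by
  induction l generalizing p a with
  | nil => simp [pvScan, pvCnt]
  | cons c l ih =>
    simp only [List.foldl_cons, pvScan, pvCnt, ih]
    by_cases h : pvMove p c = (0, 0)
    · simp [h]; ring
    · have h1 : ¬ ((pvMove p c).1 = 0 ∧ (pvMove p c).2 = 0) := by
        intro hc; exact h (Prod.ext hc.1 hc.2)
      simp [h, h1]

lemma pvA_eq_pairs (ms : List Char) (p : Int × Int) :
    pvA ms = pvPairs (p :: pvScan p ms) := by
  induction ms generalizing p with
  | nil => simp [pvA, pvPairs, pvScan, pvCnt]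
  | cons c l ih =>
    calc pvA (c :: l) = pvCnt (0, 0) (pvScan (0, 0) (c :: l)) + pvA l := rfl
      _ = pvCnt p (pvScan p (c :: l)) + pvPairs (pvMove p c :: pvScan (pvMove p c) l) := by
          rw [pv_cnt_scan_zero (c :: l) p, ih (pvMove p c)]
      _ = pvPairs (p :: pvScan p (c :: l)) := rfl

lemma pvA_range_fold (ms : List Char) (a0 : Int) :
    (List.range ms.length).foldl (fun a k => a + pvCnt (0, 0) (pvScan (0, 0) (ms.drop k))) a0
    = a0 + pvA ms := by
  induction ms generalizing a0 with
  | nil => simp [pvA]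
  | cons c l ih =>
    rw [show (c :: l).length = l.length + 1 from rfl, List.range_succ_eq_map, List.foldl_cons,
      List.foldl_map]
    simp only [List.drop_zero, List.drop_succ_cons]
    rw [ih]
    simp [pvA]; ring

-- ---- B side ----

lemma pvB_fold (l : List Char) (S : List (Int × Int)) (p : Int × Int)
    (d : PySem.Dict (Int × Int) Int) (a : Int)
    (hd : ∀ q, d.getD q 0 = pvCnt q S) :
    ((l.foldl (fun (st : PySem.Dict (Int × Int) Int × (Int × Int) × Int) c =>
        let p := pvMove st.2.1 c
        (st.1.insert p (st.1.getD p 0 + 1), p, st.2.2 + st.1.getD p 0))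
      (d, p, a)).2.2)
    = a + pvNewPairs S (pvScan p l) := by
  induction l generalizing S p d a with
  | nil => simp [pvScan, pvNewPairs]
  | cons c l ih =>
    simp only [List.foldl_cons, pvScan, pvNewPairs]
    rw [ih (S ++ [pvMove p c]) _ _ _ ?_]
    · rw [hd]; ring
    · intro q
      rw [PySem.Dict.getD_insert, pv_cnt_append_singleton, hd]
      by_cases h : q = pvMove p c
      · subst h; rw [if_pos rfl, if_pos rfl]
      · rw [if_neg h, if_neg (fun hc => h hc.symm), add_zero]; exact hd q

-- ---- range / index conversions ----

lemma pv_getD_take (cs : List Char) (m : Nat) (j : Int) (h0 : 0 ≤ j) (hj : j < (m : Int))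
    (hm : m ≤ cs.length) :
    PySem.List.pyGetD cs j 'D' = PySem.List.pyGetD (cs.take m) j 'D' := by
  have hjm : j.toNat < m := by omega
  have hlen : (cs.take m).length = m := by simp [List.length_take]; omega
  have h1 : j < (cs.length : Int) := by omega
  have h2 : j < ((cs.take m).length : Int) := by omega
  rw [PySem.List.pyGetD_eq_getElem cs 'D' h0 h1,
      PySem.List.pyGetD_eq_getElem (cs.take m) 'D' h0 h2]
  exact (List.getElem_take).symm

lemma pvA_eval (n : Int) (commands : String)
    (hpre : n ≤ (commands.toList.length : Int)) (hn : 0 < n) :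
    count_return_to_origin_substrings n commands = pvA (commands.toList.take n.toNat) := by
  unfold count_return_to_origin_substrings
  set ms := commands.toList.take n.toNat with hms
  have hlen : ms.length = n.toNat := by
    rw [hms, List.length_take]; omega
  have hcast : n = (ms.length : Int) := by rw [hlen]; omega
  rw [PySem.List.foldl_congr_mem _ _
      (fun (ans : Int) (i : Int) =>
        ((ms.drop i.toNat).foldl
          (fun (st : (Int × Int) × Int) c =>
            let q := pvMove st.1 c
            (q, if q.1 = 0 ∧ q.2 = 0 then st.2 + 1 else st.2))
          ((0, 0), ans)).2) 0 ?_]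
  · rw [PySem.List.pyRange_one, List.foldl_map,
      show (n - 0).toNat = ms.length from by omega]
    rw [PySem.List.foldl_congr_mem _ _
        (fun (a : Int) (k : Nat) => a + pvCnt (0, 0) (pvScan (0, 0) (ms.drop k))) 0 ?_]
    · exact (pvA_range_fold ms 0).trans (zero_add _)
    · intro acc k _
      rw [show ((0 : Int) + (k : Int)).toNat = k from by omega]
      exact pv_inner_fold _ _ _
  · intro ans i hi
    have hi' := PySem.List.mem_pyRange_one.mp hi
    rw [PySem.List.foldl_congr_mem _ _
        (fun (st : (Int × Int) × Int) (j : Int) =>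
          let q := pvMove st.1 (PySem.List.pyGetD ms j 'D')
          (q, if q.1 = 0 ∧ q.2 = 0 then st.2 + 1 else st.2)) ((0, 0), ans) ?_]
    · rw [hcast, PySem.List.foldl_pyRange_pyGetD' ms 'D'
        (fun (st : (Int × Int) × Int) c =>
          let q := pvMove st.1 c
          (q, if q.1 = 0 ∧ q.2 = 0 then st.2 + 1 else st.2)) ((0, 0), ans) hi'.1]
    · intro st j hj
      have hj' := PySem.List.mem_pyRange_one.mp hj
      have hg := pv_getD_take commands.toList n.toNat j
        (le_trans hi'.1 hj'.1) (by omega) (by omega)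
      rw [← hms] at hg
      rw [hg]

lemma pvB_eval (n : Int) (commands : String)
    (hpre : n ≤ (commands.toList.length : Int)) (hn : 0 < n) :
    count_return_to_origin_substrings_alt n commands
      = pvNewPairs [((0, 0) : Int × Int)] (pvScan (0, 0) (commands.toList.take n.toNat)) := by
  unfold count_return_to_origin_substrings_alt
  set ms := commands.toList.take n.toNat with hms
  have hlen : ms.length = n.toNat := by
    rw [hms, List.length_take]; omega
  have hcast : n = (ms.length : Int) := by rw [hlen]; omega
  rw [PySem.List.foldl_congr_mem _ _
      (fun (st : PySem.Dict (Int × Int) Int × (Int × Int) × Int) (j : Int) =>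
        let p := pvMove st.2.1 (PySem.List.pyGetD ms j 'D')
        (st.1.insert p (st.1.getD p 0 + 1), p, st.2.2 + st.1.getD p 0)) _ ?_]
  · rw [hcast, PySem.List.foldl_pyRange_zero_pyGetD' ms 'D'
      (fun (st : PySem.Dict (Int × Int) Int × (Int × Int) × Int) c =>
        let p := pvMove st.2.1 c
        (st.1.insert p (st.1.getD p 0 + 1), p, st.2.2 + st.1.getD p 0)) _]
    rw [pvB_fold ms [((0, 0) : Int × Int)] (0, 0) _ 0 ?_]
    · exact zero_add _
    · intro q
      rw [PySem.Dict.getD_insert]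
      by_cases h : q = ((0, 0) : Int × Int)
      · subst h; rw [if_pos rfl]; simp [pvCnt]
      · have h' : ¬ ((0, 0) : Int × Int) = q := fun hc => h hc.symm
        rw [if_neg h]
        simp [pvCnt, h', PySem.Dict.getD_empty]
  · intro st j hj
    have hj' := PySem.List.mem_pyRange_one.mp hj
    have hg := pv_getD_take commands.toList n.toNat j hj'.1 (by omega) (by omega)
    rw [← hms] at hg
    rw [hg]

-- ===== VERDICT (by name: the statement is the Claim_ definition above) =====
theorem count_return_to_origin_substrings_spec : Claim_equal_count_return_to_origin_substrings := by
  intro n commands _ hpre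
  unfold Spec_count_return_to_origin_substrings
  unfold Pre_count_return_to_origin_substrings at hpre
  by_cases hn : 0 < n
  · rw [pvA_eval n commands hpre hn, pvB_eval n commands hpre hn,
      pvA_eq_pairs _ ((0, 0) : Int × Int)]
    have h := pv_pairs_append (pvScan (0, 0) (commands.toList.take n.toNat))
      [((0, 0) : Int × Int)]
    simp only [List.singleton_append] at h
    rw [h]
    simp [pvPairs, pvCnt]
  · have hn' : n ≤ 0 := by omega
    unfold count_return_to_origin_substrings count_return_to_origin_substrings_alt
    rw [PySem.List.pyRange_one_eq_nil hn']
    rfl
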